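-- pv_equiv track=rewrite | github.com/nimod7890/Problem-Solving | Gold/Gold 5/2447 별 찍기.py | go
-- ===== SOURCE A (Python) =====
-- def go(num):
--     if num==3:
--         return ["***","* *","***"]
--     nlist=[]
--     star=go(num//3)
--     for i in range(3):
--         for v in star:
--             if i==1:
--                 nlist.append(v+" "*(num//3)+v)
--             else:
--                 nlist.append(v*3)
--     return nlist
-- ===== SOURCE B (Python) =====
-- def go(num):
--     # sizes chain: num, num//3, ... while > 3; A terminates exactly when this chain lands on 3
--     sizes = []
--     n = num
--     while n > 3:
--         sizes.append(n)
--         n //= 3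
--     if n != 3:
--         raise ValueError("num must reduce to 3 by repeated //3")
--     base = ["***", "* *", "***"]
--     rows = []
--     for r in range(3 ** (len(sizes) + 1)):
--         # build row r directly from the base-3 digits of r: lowest digit picks the base row,
--         # each higher digit decides centre-gap (digit 1) or plain tripling at that scale
--         row = base[r % 3]
--         q = r // 3
--         for w in reversed(sizes):
--             if q % 3 == 1:
--                 row = row + " " * (w // 3) + row
--             else:
--                 row = row + row + row
--             q //= 3
--         rows.append(row)
--     return rows
-- ===== Notes on version B (the rewrite author's own statement) =====
-- stated objective: alternative
-- what changed: Replaces the recursive composition of whole sub-grids with a direct per-row construction: B first computes the //3 size chain once, then builds each row independently from the base-3 digits of its row index (lowest digit picks the base row, each higher digit decides centre-gap vs tripling at that scale), with no recursion and no intermediate grids.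
-- outside the precondition, e.g. on go(1): A raises RecursionError, B raises ValueError; on go(4): A raises RecursionError, B raises ValueError
import Mathlib
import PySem

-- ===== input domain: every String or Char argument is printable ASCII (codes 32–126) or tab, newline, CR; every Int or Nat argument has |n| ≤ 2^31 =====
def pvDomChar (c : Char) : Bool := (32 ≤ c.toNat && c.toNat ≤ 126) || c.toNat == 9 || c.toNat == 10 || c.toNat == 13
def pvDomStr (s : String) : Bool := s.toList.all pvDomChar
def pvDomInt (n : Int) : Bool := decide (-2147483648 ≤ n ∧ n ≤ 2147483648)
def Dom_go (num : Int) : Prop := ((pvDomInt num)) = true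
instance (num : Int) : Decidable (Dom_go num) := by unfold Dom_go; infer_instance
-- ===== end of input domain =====

-- B replaces A's recursive composition of whole sub-grids by a per-row construction driven by the
-- base-3 digits of the row index over the precomputed //3 size chain; similar cost, no recursion on grids.


-- ===== PORT A =====
-- rows are kept as List Char (PySem convention: string facts live on the list side); go wraps them into String at the end.
-- The 'num ≤ 3 ∧ num ≠ 3' guard only makes the recursion total: Python recurses forever there (outside Pre_go).
def goChars (num : Int) : List (List Char) :=
  if num = 3 then [['*','*','*'], ['*',' ','*'], ['*','*','*']]
  else if _h : num ≤ 3 then []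
  else
    let star := goChars (PySem.Int.floordiv num 3)
    (PySem.List.pyRange 0 3 1).foldl (fun nlist i =>
      star.foldl (fun nlist v =>
        nlist ++ [if i = 1 then v ++ PySem.List.pyRepeat [' '] (PySem.Int.floordiv num 3) ++ v
                  else PySem.List.pyRepeat v 3]) nlist) []
  termination_by num.toNat
  decreasing_by
    have h3 : PySem.Int.floordiv num 3 = num / 3 := PySem.Int.floordiv_eq_ediv_of_pos (by omega)
    rw [h3]; omega

def go (num : Int) : List String := (goChars num).map String.ofList

-- ===== PORT B =====
-- the while-loop collecting the //3 size chain ('sizes', final n); the recursion is the loop, made total by toNat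
def chainLoop (n : Int) (sizes : List Int) : List Int × Int :=
  if 3 < n then chainLoop (PySem.Int.floordiv n 3) (sizes ++ [n]) else (sizes, n)
  termination_by n.toNat
  decreasing_by
    have h3 : PySem.Int.floordiv n 3 = n / 3 := PySem.Int.floordiv_eq_ediv_of_pos (by omega)
    rw [h3]; omega

def baseRows : List (List Char) := [['*','*','*'], ['*',' ','*'], ['*','*','*']]

-- one step of the inner 'for w in reversed(sizes)' loop: state is (row, q)
def rowStep (st : List Char × Int) (w : Int) : List Char × Int :=
  if PySem.Int.mod st.2 3 = 1
  then (st.1 ++ PySem.List.pyRepeat [' '] (PySem.Int.floordiv w 3) ++ st.1, PySem.Int.floordiv st.2 3)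
  else (st.1 ++ st.1 ++ st.1, PySem.Int.floordiv st.2 3)

-- row r: start from base[r % 3], fold the digit-driven ops over reversed(sizes)
def rowB (sizes : List Int) (r : Int) : List Char :=
  (sizes.reverse.foldl rowStep
    (PySem.List.pyGetD baseRows (PySem.Int.mod r 3) [], PySem.Int.floordiv r 3)).1

def go_alt (num : Int) : List String :=
  let p := chainLoop num []
  if p.2 ≠ 3 then []  -- Python raises ValueError here (outside Pre_go); [] stands in for the absent value
  else (PySem.List.pyRange 0 (3 ^ (p.1.length + 1)) 1).map (fun r => String.ofList (rowB p.1 r))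

-- ===== PRECONDITION & SPEC =====
-- Pre_go: exactly the inputs where the Python A terminates (both programs raise elsewhere) — the //3
-- chain from num lands exactly on 3, i.e. 3^k ≤ num ≤ 4*3^(k-1) - 1 for some k ≥ 1. The bound
-- k ≤ Nat.log 3 num.toNat only makes the existential quickly decidable; it excludes nothing
-- (3^k ≤ num already forces k ≤ log₃ num).
def Pre_go (num : Int) : Prop :=
  ∃ k : Nat, k ≤ Nat.log 3 num.toNat ∧ 1 ≤ k ∧ (3:Int) ^ k ≤ num ∧ num ≤ 4 * 3 ^ (k - 1) - 1
instance (num : Int) : Decidable (Pre_go num) := by unfold Pre_go; infer_instance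
def pvWitness_go : Int := 3

def Spec_go (num : Int) (out : List String) : Prop := out = go_alt num
instance (num : Int) (out : List String) : Decidable (Spec_go num out) := by unfold Spec_go; infer_instance

-- ===== CLAIM (what is proved, stated in full; the proofs are below) =====
def Claim_equal_go : Prop := ∀ (num : Int), Dom_go num → Pre_go num → Spec_go num (go num)

-- ===== LEMMAS AND PROOFS =====

-- num lies in the k-th size interval (the inputs whose chain reaches 3 in exactly k-1 divisions)
def inI (k : Nat) (num : Int) : Prop := (3:Int) ^ k ≤ num ∧ num ≤ 4 * 3 ^ (k - 1) - 1

-- the sizes list chainLoop produces from a member of the k-th interval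
def sizesK : Nat → Int → List Int
  | 0, _ => []
  | k+1, num => if k = 0 then [] else num :: sizesK k (PySem.Int.floordiv num 3)

lemma floordiv3 (num : Int) : PySem.Int.floordiv num 3 = num / 3 :=
  PySem.Int.floordiv_eq_ediv_of_pos (by omega)

lemma inI_one (num : Int) (h : inI 1 num) : num = 3 := by
  obtain ⟨h1, h2⟩ := h; norm_num at h1 h2; omega

lemma inI_gt (k : Nat) (hk : 1 ≤ k) (num : Int) (h : inI (k+1) num) : 3 < num := by
  obtain ⟨h1, _⟩ := h
  have : (3:Int) ^ 2 ≤ 3 ^ (k+1) := pow_le_pow_right₀ (by norm_num) (by omega)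
  norm_num at this
  omega

lemma inI_step (k : Nat) (hk : 1 ≤ k) (num : Int) (h : inI (k+1) num) :
    inI k (PySem.Int.floordiv num 3) := by
  obtain ⟨h1, h2⟩ := h
  rw [floordiv3]
  constructor
  · have hp : (3:Int) ^ (k+1) = 3 * 3 ^ k := by ring
    rw [hp] at h1
    omega
  · have hp : (4:Int) * 3 ^ (k+1-1) - 1 = 3 * (4 * 3 ^ (k-1) - 1) + 2 := by
      have : (3:Int) ^ (k+1-1) = 3 * 3 ^ (k-1) := by
        rw [← pow_succ']
        congr 1
        omega
      rw [this]; ring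
    rw [hp] at h2
    omega

lemma chainLoop_spec (k : Nat) (hk : 1 ≤ k) (num : Int) (h : inI k num) :
    ∀ acc, chainLoop num acc = (acc ++ sizesK k num, 3) := by
  induction k generalizing num with
  | zero => omega
  | succ k ih =>
    intro acc
    by_cases hk0 : k = 0
    · subst hk0
      have h3 : num = 3 := inI_one num h
      subst h3
      rw [chainLoop]
      norm_num [sizesK]
    · have hk1 : 1 ≤ k := by omega
      have hgt := inI_gt k hk1 num h
      rw [chainLoop, if_pos hgt, ih hk1 (PySem.Int.floordiv num 3) (inI_step k hk1 num h) (acc ++ [num])]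
      simp [sizesK, hk0]

lemma length_sizesK (k : Nat) (hk : 1 ≤ k) (num : Int) : (sizesK k num).length = k - 1 := by
  induction k generalizing num with
  | zero => omega
  | succ k ih =>
    by_cases hk0 : k = 0
    · subst hk0; simp [sizesK]
    · simp only [sizesK, if_neg hk0, List.length_cons, ih (by omega)]
      omega

-- B's row fold, with the initial state written over a Nat row index
def foldN (sizes : List Int) (r : Nat) : List Char × Int :=
  sizes.reverse.foldl rowStep
    (PySem.List.pyGetD baseRows (((r % 3 : Nat) : Int)) [], ((r / 3 : Nat) : Int))

lemma rowB_natCast (sizes : List Int) (r : Nat) : rowB sizes (r : Int) = (foldN sizes r).1 := by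
  rw [rowB, foldN]
  have hm : PySem.Int.mod (r : Int) 3 = ((r % 3 : Nat) : Int) := by
    exact_mod_cast PySem.Int.mod_natCast r 3
  have hd : PySem.Int.floordiv (r : Int) 3 = ((r / 3 : Nat) : Int) := by
    exact_mod_cast PySem.Int.floordiv_natCast r 3
  rw [hm, hd]

lemma foldN_cons (w : Int) (tail : List Int) (r : Nat) :
    foldN (w :: tail) r = rowStep (foldN tail r) w := by
  simp [foldN, List.reverse_cons, List.foldl_append]

-- the fold only reads the low (len+1) base-3 digits of r into the row, and returns the rest as q
lemma foldN_spec (sizes : List Int) (r : Nat) :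
    foldN sizes r
      = ((foldN sizes (r % 3 ^ (sizes.length + 1))).1, ((r / 3 ^ (sizes.length + 1) : Nat) : Int)) := by
  induction sizes generalizing r with
  | nil =>
    simp only [foldN, List.reverse_nil, List.foldl_nil, List.length_nil]
    norm_num
  | cons w tail ih =>
    set m := tail.length + 1 with hm
    rw [foldN_cons, foldN_cons, ih r, ih (r % 3 ^ ((w :: tail).length + 1))]
    have hlen : (w :: tail).length + 1 = m + 1 := by simp [hm]
    rw [hlen]
    have e1 : r % 3 ^ (m+1) % 3 ^ m = r % 3 ^ m :=
      Nat.mod_mod_of_dvd r (pow_dvd_pow 3 (by omega))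
    have e2 : r % 3 ^ (m+1) / 3 ^ m = r / 3 ^ m % 3 := by
      rw [pow_succ]
      exact Nat.mod_mul_right_div_self r (3 ^ m) 3
    rw [e1, e2, rowStep, rowStep]
    have hmod : ∀ q : Nat, PySem.Int.mod ((q : Nat) : Int) 3 = ((q % 3 : Nat) : Int) := by
      intro q; exact_mod_cast PySem.Int.mod_natCast q 3
    have hdiv : ∀ q : Nat, PySem.Int.floordiv ((q : Nat) : Int) 3 = ((q / 3 : Nat) : Int) := by
      intro q; exact_mod_cast PySem.Int.floordiv_natCast q 3
    rw [hmod, hmod, hdiv]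
    have e3 : r / 3 ^ m % 3 % 3 = r / 3 ^ m % 3 := Nat.mod_mod_of_dvd _ dvd_rfl
    have e4 : r / 3 ^ m / 3 = r / 3 ^ (m+1) := by
      rw [Nat.div_div_eq_div_mul, ← pow_succ]
    rw [e3, e4]
    split_ifs with h1 <;> rfl

-- decomposing a row index by its top digit
lemma rowB_decomp (sizes : List Int) (num : Int) (c r : Nat) (hc : c < 3)
    (hr : r < 3 ^ (sizes.length + 1)) :
    rowB (num :: sizes) ((c * 3 ^ (sizes.length + 1) + r : Nat) : Int)
      = if c = 1
        then rowB sizes (r : Int) ++ PySem.List.pyRepeat [' '] (PySem.Int.floordiv num 3) ++ rowB sizes (r : Int)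
        else rowB sizes (r : Int) ++ rowB sizes (r : Int) ++ rowB sizes (r : Int) := by
  set m := sizes.length + 1 with hm
  rw [rowB_natCast, foldN_cons, foldN_spec]
  have e1 : (c * 3 ^ m + r) % 3 ^ m = r := by
    rw [mul_comm, Nat.mul_add_mod, Nat.mod_eq_of_lt hr]
  have e2 : (c * 3 ^ m + r) / 3 ^ m = c := by
    rw [mul_comm c, Nat.mul_add_div (Nat.pow_pos (show 0 < 3 by norm_num) : 0 < 3 ^ m),
      Nat.div_eq_of_lt hr, Nat.add_zero]
  rw [e1, e2, rowStep]
  have hmc : PySem.Int.mod ((c : Nat) : Int) 3 = ((c % 3 : Nat) : Int) := by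
    exact_mod_cast PySem.Int.mod_natCast c 3
  rw [hmc, Nat.mod_eq_of_lt hc]
  have hcast : (((c : Nat) : Int) = 1) ↔ c = 1 := by omega
  rw [rowB_natCast]
  split_ifs with h1 h2 <;> simp_all

lemma pyRepeat_three (v : List Char) : PySem.List.pyRepeat v 3 = v ++ v ++ v := by
  simp [PySem.List.pyRepeat]

lemma goChars_unfold (num : Int) (h : 3 < num) :
    goChars num
      = (goChars (PySem.Int.floordiv num 3)).map (fun v => PySem.List.pyRepeat v 3)
        ++ (goChars (PySem.Int.floordiv num 3)).map
            (fun v => v ++ PySem.List.pyRepeat [' '] (PySem.Int.floordiv num 3) ++ v)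
        ++ (goChars (PySem.Int.floordiv num 3)).map (fun v => PySem.List.pyRepeat v 3) := by
  rw [goChars, if_neg (by omega : ¬ num = 3), dif_neg (by omega : ¬ num ≤ 3)]
  have hrange : PySem.List.pyRange 0 3 1 = [0, 1, 2] := by decide
  rw [hrange]
  simp only [List.foldl_cons, List.foldl_nil]
  rw [PySem.List.foldl_append_singleton_eq_map, PySem.List.foldl_append_singleton_eq_map,
    PySem.List.foldl_append_singleton_eq_map]
  norm_num

lemma main_lemma (k : Nat) (hk : 1 ≤ k) (num : Int) (h : inI k num) :
    goChars num = (List.range (3 ^ k)).map (fun r : Nat => rowB (sizesK k num) (r : Int)) := by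
  induction k generalizing num with
  | zero => omega
  | succ k ih =>
    by_cases hk0 : k = 0
    · subst hk0
      have h3 : num = 3 := inI_one num h
      subst h3
      rw [goChars]
      norm_num
      decide
    · have hk1 : 1 ≤ k := by omega
      have hgt := inI_gt k hk1 num h
      rw [goChars_unfold num hgt, ih hk1 _ (inI_step k hk1 num h)]
      have hsz : sizesK (k+1) num = num :: sizesK k (PySem.Int.floordiv num 3) := by
        simp [sizesK, hk0]
      rw [hsz]
      set rest := sizesK k (PySem.Int.floordiv num 3) with hrest
      have hlen : rest.length + 1 = k := by rw [hrest, length_sizesK k hk1]; omega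
      have h3 : (3:Nat) ^ (k+1) = 3 ^ k + 3 ^ k + 3 ^ k := by ring
      rw [h3]
      simp only [List.range_add, List.map_append, List.map_map]
      have block : ∀ (off : Nat → Nat) (c : Nat), c < 3 → (∀ t, off t = c * 3 ^ k + t) →
          (List.range (3 ^ k)).map ((fun r : Nat => rowB (num :: rest) (r : Int)) ∘ off)
          = ((List.range (3 ^ k)).map (fun r : Nat => rowB rest (r : Int))).map
              (fun v => if c = 1
                then v ++ PySem.List.pyRepeat [' '] (PySem.Int.floordiv num 3) ++ v
                else v ++ v ++ v) := by
        intro off c hc hoff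
        rw [List.map_map]
        apply List.map_congr_left
        intro t ht
        rw [List.mem_range] at ht
        simp only [Function.comp, hoff t]
        have ht' : t < 3 ^ (rest.length + 1) := by rw [hlen]; exact ht
        have hd := rowB_decomp rest num c t hc ht'
        rw [hlen] at hd
        rw [hd]
      have b0 := block id 0 (by omega) (by intro t; simp)
      have b1 := block (fun x => 3 ^ k + x) 1 (by omega) (by intro t; ring)
      have b2 := block (fun x => 3 ^ k + 3 ^ k + x) 2 (by omega) (by intro t; ring)
      rw [show (List.range (3 ^ k)).map (fun r : Nat => rowB (num :: rest) (r : Int))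
            = (List.range (3 ^ k)).map ((fun r : Nat => rowB (num :: rest) (r : Int)) ∘ id) from by simp,
        b0, b1, b2]
      simp only [List.map_map]
      norm_num [pyRepeat_three, Function.comp]

-- ===== VERDICT (by name: the statement is the Claim_ definition above) =====
theorem go_spec : Claim_equal_go := by
  intro num _ hpre
  obtain ⟨k, _, hk1, h1, h2⟩ := hpre
  have hin : inI k num := ⟨h1, h2⟩
  unfold Spec_go go go_alt
  rw [chainLoop_spec k hk1 num hin []]
  simp only [List.nil_append]
  rw [if_neg (by norm_num)]
  rw [main_lemma k hk1 num hin, length_sizesK k hk1]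
  have hpow : ((3:Int) ^ (k - 1 + 1)) = ((3 ^ k : Nat) : Int) := by
    push_cast
    congr 1
    omega
  rw [hpow, PySem.List.pyRange_one]
  simp only [Int.sub_zero, Int.toNat_natCast, List.map_map]
  apply List.map_congr_left
  intro r _
  simp
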